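-- pv_equiv track=rewrite | github.com/Felipe34515/Recursos-Introduci-n-a-la-programaci-n- | Hojas de trabajo/P3/Mustreo contrato/leer_archivos.py | contrato_mayor_valor
-- ===== SOURCE A (Python) =====
-- def contrato_mayor_valor (contratos) :
--     max = 0
--     rta = {}
--     for contrato in contratos:
--         if contrato["valor"]> max:
--             max = contrato["valor"]
--     for contrato in contratos:
--         if contrato["valor"]== max:
--             rta = contrato
--     return rta
-- ===== SOURCE B (Python) =====
-- def contrato_mayor_valor(contratos):
--     # Single fused pass: running max starts at 0; '>=' keeps the LAST contract
--     # reaching the running max, which ends up being the last one with the global max.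
--     max = 0
--     rta = {}
--     for contrato in contratos:
--         if contrato["valor"] >= max:
--             max = contrato["valor"]
--             rta = contrato
--     return rta
-- ===== Notes on version B (the rewrite author's own statement) =====
-- stated objective: simpler
-- what changed: The two scans (one to find the maximum, one to find the last contract equal to it) are fused into a single pass whose '>=' update keeps the last record-reaching contract.
import Mathlib
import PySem

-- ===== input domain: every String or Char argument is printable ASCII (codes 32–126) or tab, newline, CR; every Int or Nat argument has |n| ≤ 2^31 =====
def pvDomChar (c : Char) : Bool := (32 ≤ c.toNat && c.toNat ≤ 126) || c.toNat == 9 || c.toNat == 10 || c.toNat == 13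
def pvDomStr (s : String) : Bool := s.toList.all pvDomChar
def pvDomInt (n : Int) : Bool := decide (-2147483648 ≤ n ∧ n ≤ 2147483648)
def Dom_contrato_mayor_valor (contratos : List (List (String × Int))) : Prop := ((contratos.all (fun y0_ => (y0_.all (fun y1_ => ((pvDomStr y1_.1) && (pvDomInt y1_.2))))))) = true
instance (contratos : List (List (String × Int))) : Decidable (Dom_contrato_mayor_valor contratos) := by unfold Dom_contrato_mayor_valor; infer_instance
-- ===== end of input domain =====

-- B fuses A's two scans into one pass; objective: simpler (one loop instead of two).

-- contrato["valor"]: first matching entry of the association list; the default 0 is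
-- never reached on Pre_ (every contract has the key), where Python would raise KeyError.
def pvVal (c : List (String × Int)) : Int :=
  ((c.find? (fun p => p.1 == "valor")).map Prod.snd).getD 0

-- ===== PORT A =====
def contrato_mayor_valor (contratos : List (List (String × Int))) : List (String × Int) :=
  let m := contratos.foldl (fun mx c => if pvVal c > mx then pvVal c else mx) 0
  contratos.foldl (fun r c => if pvVal c = m then c else r) []

-- ===== PORT B =====
def contrato_mayor_valor_alt (contratos : List (List (String × Int))) : List (String × Int) :=
  (contratos.foldl
    (fun (s : Int × List (String × Int)) c => if pvVal c ≥ s.1 then (pvVal c, c) else s)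
    (0, [])).2

-- ===== PRECONDITION & SPEC =====
-- Pre_ excludes exactly the inputs where some contract lacks the key "valor": there Python A raises KeyError.
def Pre_contrato_mayor_valor (contratos : List (List (String × Int))) : Prop :=
  (contratos.all (fun c => c.any (fun p => p.1 == "valor"))) = true
instance (contratos : List (List (String × Int))) : Decidable (Pre_contrato_mayor_valor contratos) := by unfold Pre_contrato_mayor_valor; infer_instance
def pvWitness_contrato_mayor_valor : (List (List (String × Int))) := [[("valor", 3)], [("valor", 3), ("id", 1)]]

def Spec_contrato_mayor_valor (contratos : List (List (String × Int))) (out : List (String × Int)) : Prop := out = contrato_mayor_valor_alt contratos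
instance (contratos : List (List (String × Int))) (out : List (String × Int)) : Decidable (Spec_contrato_mayor_valor contratos out) := by unfold Spec_contrato_mayor_valor; infer_instance

-- ===== CLAIM (what is proved, stated in full; the proofs are below) =====
def Claim_equal_contrato_mayor_valor : Prop := ∀ (contratos : List (List (String × Int))), Dom_contrato_mayor_valor contratos → Pre_contrato_mayor_valor contratos → Spec_contrato_mayor_valor contratos (contrato_mayor_valor contratos)

-- ===== LEMMAS AND PROOFS =====

-- running maximum of A's first loop, with a general initial value
def pvFMax (mx : Int) (cs : List (List (String × Int))) : Int :=
  cs.foldl (fun mx c => if pvVal c > mx then pvVal c else mx) mx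

theorem pvFMax_ge (mx : Int) (cs : List (List (String × Int))) : mx ≤ pvFMax mx cs := by
  induction cs generalizing mx with
  | nil => simp [pvFMax]
  | cons c cs ih =>
    simp only [pvFMax, List.foldl_cons]
    split_ifs with h
    · exact le_trans (le_of_lt h) (ih _)
    · exact ih mx

theorem pvFMax_achieve (mx : Int) (cs : List (List (String × Int))) :
    pvFMax mx cs = mx ∨ ∃ c ∈ cs, pvVal c = pvFMax mx cs := by
  induction cs generalizing mx with
  | nil => left; rfl
  | cons c cs ih =>
    by_cases h : pvVal c > mx
    · have h2 : pvFMax mx (c :: cs) = pvFMax (pvVal c) cs := by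
        simp only [pvFMax, List.foldl_cons, if_pos h]
      rw [h2]
      rcases ih (pvVal c) with h' | ⟨c', hc', hv⟩
      · right; exact ⟨c, List.mem_cons_self, h'.symm⟩
      · right; exact ⟨c', List.mem_cons_of_mem _ hc', hv⟩
    · have h2 : pvFMax mx (c :: cs) = pvFMax mx cs := by
        simp only [pvFMax, List.foldl_cons, if_neg h]
      rw [h2]
      rcases ih mx with h' | ⟨c', hc', hv⟩
      · left; exact h'
      · right; exact ⟨c', List.mem_cons_of_mem _ hc', hv⟩

-- A's second loop ignores its initial accumulator once some element attains M
theorem pvSel_indep (M : Int) (cs : List (List (String × Int)))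
    (h : ∃ c ∈ cs, pvVal c = M) (x y : List (String × Int)) :
    cs.foldl (fun r c => if pvVal c = M then c else r) x
      = cs.foldl (fun r c => if pvVal c = M then c else r) y := by
  induction cs generalizing x y with
  | nil => rcases h with ⟨c, hc, _⟩; exact absurd hc (List.not_mem_nil)
  | cons c cs ih =>
    simp only [List.foldl_cons]
    by_cases hc : pvVal c = M
    · simp [hc]
    · rcases h with ⟨c', hc', hv⟩
      rcases List.mem_cons.mp hc' with rfl | hmem
      · exact absurd hv hc
      · simp only [hc, if_false]
        exact ih ⟨c', hmem, hv⟩ x y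

-- the fused loop simultaneously computes A's running maximum and A's selection
theorem pvFused (cs : List (List (String × Int))) (mx : Int) (r : List (String × Int)) :
    cs.foldl (fun (s : Int × List (String × Int)) c => if pvVal c ≥ s.1 then (pvVal c, c) else s) (mx, r)
      = (pvFMax mx cs,
         cs.foldl (fun r c => if pvVal c = pvFMax mx cs then c else r) r) := by
  induction cs generalizing mx r with
  | nil => rfl
  | cons c cs ih =>
    simp only [List.foldl_cons]
    by_cases hgt : pvVal c > mx
    · have h2 : pvFMax mx (c :: cs) = pvFMax (pvVal c) cs := by
        simp only [pvFMax, List.foldl_cons, if_pos hgt]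
      have h1 : (if pvVal c ≥ mx then (pvVal c, c) else (mx, r)) = (pvVal c, c) := by
        simp [le_of_lt hgt]
      rw [h1, ih, h2]
      by_cases hcM : pvVal c = pvFMax (pvVal c) cs
      · rw [if_pos hcM]
      · have hach : ∃ c' ∈ cs, pvVal c' = pvFMax (pvVal c) cs := by
          rcases pvFMax_achieve (pvVal c) cs with h' | h'
          · exact absurd h'.symm hcM
          · exact h'
        rw [if_neg hcM, pvSel_indep _ cs hach c r]
    · have h2 : pvFMax mx (c :: cs) = pvFMax mx cs := by
        simp only [pvFMax, List.foldl_cons, if_neg hgt]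
      rw [h2]
      by_cases heq : pvVal c = mx
      · have h1 : (if pvVal c ≥ mx then (pvVal c, c) else (mx, r)) = (mx, c) := by
          simp [heq]
        rw [h1, ih]
        by_cases hcM : pvVal c = pvFMax mx cs
        · rw [if_pos hcM]
        · have hach : ∃ c' ∈ cs, pvVal c' = pvFMax mx cs := by
            rcases pvFMax_achieve mx cs with h' | h'
            · exact absurd (heq.trans h'.symm) hcM
            · exact h'
          rw [if_neg hcM, pvSel_indep _ cs hach c r]
      · have hlt : pvVal c < mx := lt_of_le_of_ne (not_lt.mp hgt) heq
        have h1 : (if pvVal c ≥ mx then (pvVal c, c) else (mx, r)) = (mx, r) := by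
          simp [not_le.mpr hlt]
        have hcM : pvVal c ≠ pvFMax mx cs := by
          intro h
          exact absurd (pvFMax_ge mx cs) (not_le.mpr (h ▸ hlt))
        rw [h1, ih, if_neg hcM]

-- ===== VERDICT (by name: the statement is the Claim_ definition above) =====
theorem contrato_mayor_valor_spec : Claim_equal_contrato_mayor_valor := by
  intro contratos _ _
  unfold Spec_contrato_mayor_valor contrato_mayor_valor contrato_mayor_valor_alt
  rw [pvFused]
  rfl
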